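-- pv_equiv track=rewrite | github.com/pilotso11/aoc2021 | day11.py | flash_cell
-- ===== SOURCE A (Python) =====
-- def flash_cell(map, y, x):
--     flashes = 0
--     if map[y][x] >= 10:
--         flashes += 1
--         map[y][x] = 0
--         for y2 in range(y-1, y+2):
--             for x2 in range(x-1, x+2):
--                 if y2 >= 0 and y2 < len(map) and x2 >= 0 and x2 < len(map[y2]):
--                     if map[y2][x2] != 0:
--                         map[y2][x2] += 1
--                         flashes += flash_cell(map, y2, x2)
--     return flashes
-- ===== SOURCE B (Python) =====
-- # Explicit-worklist re-implementation: the recursion of A is replaced by a stack of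
-- # deferred tasks.  A "visit" task flashes its cell if it is (still) >= 10; a "bump"
-- # task performs the neighbour bounds/non-zero check and increment at pop time and
-- # then schedules a visit of that neighbour.  Neighbour tasks are pushed in reverse
-- # order so popping from the end reproduces A's depth-first order exactly (same
-- # final map mutation and same flash count).
-- def flash_cell(map, y, x):
--     flashes = 0
--     stack = [("visit", y, x)]
--     while stack:
--         kind, cy, cx = stack.pop()
--         if kind == "visit":
--             if map[cy][cx] >= 10:
--                 flashes += 1
--                 map[cy][cx] = 0
--                 for y2 in range(cy + 1, cy - 2, -1):
--                     for x2 in range(cx + 1, cx - 2, -1):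
--                         stack.append(("bump", y2, x2))
--         else:
--             if 0 <= cy < len(map) and 0 <= cx < len(map[cy]) and map[cy][cx] != 0:
--                 map[cy][cx] += 1
--                 stack.append(("visit", cy, cx))
--     return flashes
-- ===== Notes on version B (the rewrite author's own statement) =====
-- stated objective: alternative
-- what changed: A's immediate recursive flash propagation is replaced by an explicit worklist: a stack of deferred visit/bump tasks where a popped visit re-checks >= 10 before flashing and a popped bump does the bounds/non-zero check and increment, so the call stack disappears.
-- outside the precondition, e.g. on flash_cell([[1, 2]], 5, 0): A raises IndexError, B raises IndexError
import Mathlib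
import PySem

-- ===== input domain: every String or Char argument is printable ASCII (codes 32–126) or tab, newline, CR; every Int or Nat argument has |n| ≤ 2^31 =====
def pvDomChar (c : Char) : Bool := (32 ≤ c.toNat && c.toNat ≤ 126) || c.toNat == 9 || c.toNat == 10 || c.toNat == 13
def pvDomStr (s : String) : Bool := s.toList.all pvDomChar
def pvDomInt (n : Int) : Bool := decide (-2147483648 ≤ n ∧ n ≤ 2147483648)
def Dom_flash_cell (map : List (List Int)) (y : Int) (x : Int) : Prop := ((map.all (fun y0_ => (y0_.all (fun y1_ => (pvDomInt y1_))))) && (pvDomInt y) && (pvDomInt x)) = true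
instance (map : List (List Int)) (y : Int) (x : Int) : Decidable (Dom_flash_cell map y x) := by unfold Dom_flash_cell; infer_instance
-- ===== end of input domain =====

-- B replaces A's recursion by an explicit worklist of deferred visit/bump tasks
-- (same depth-first order, hence the same return value and the same in-place map
-- mutation); equivalence proved about the RETURN value only.

-- shared low-level helpers (Python grid reads/writes, exact on in-range accesses)
def pvGet (m : List (List Int)) (y x : Int) : Int :=
  PySem.List.pyGetD (PySem.List.pyGetD m y []) x 0

def pvSet (m : List (List Int)) (y x v : Int) : List (List Int) :=
  PySem.List.pySetD m y (PySem.List.pySetD (PySem.List.pyGetD m y []) x v)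

def pvInb (m : List (List Int)) (y2 x2 : Int) : Bool :=
  decide (0 ≤ y2) && decide (y2 < (m.length : Int)) && decide (0 ≤ x2) &&
    decide (x2 < ((PySem.List.pyGetD m y2 []).length : Int))

-- fuel: one more than the number of cells; a cell flashes at most once (a zeroed
-- cell is never incremented), so a chain of nested flashes is never longer than
-- the number of cells and the fuel guard below is never the reason a call stops.
def pvFuel (m : List (List Int)) : Nat := m.foldl (fun a r => a + r.length) 0 + 1

-- ===== PORT A =====
def flashAux : Nat → List (List Int) → Int → Int → List (List Int) × Int
  | 0, m, _, _ => (m, 0)   -- fuel guard only; never reached from pvFuel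
  | n+1, m, y, x =>
    if 10 ≤ pvGet m y x then
      let st := (PySem.List.pyRange (y-1) (y+2) 1).foldl (fun st y2 =>
          (PySem.List.pyRange (x-1) (x+2) 1).foldl (fun st x2 =>
            if pvInb st.1 y2 x2 && (pvGet st.1 y2 x2 != 0) then
              let r := flashAux n (pvSet st.1 y2 x2 (pvGet st.1 y2 x2 + 1)) y2 x2
              (r.1, st.2 + r.2)
            else st) st)
        (pvSet m y x 0, 0)
      (st.1, 1 + st.2)
    else (m, 0)

def flash_cell (map : List (List Int)) (y : Int) (x : Int) : Int :=
  (flashAux (pvFuel map) map y x).2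

-- ===== PORT B =====
-- Source B's stack entries ("visit",y,x) / ("bump",y,x); the Nat is the fuel guard.
inductive PvTask where
  | visit : Nat → Int → Int → PvTask
  | bump : Nat → Int → Int → PvTask

def pvWeight : PvTask → Nat
  | .visit n _ _ => 10 ^ (n + 1)
  | .bump n _ _ => 10 ^ (n + 1) + 1

-- termination helper for runB, cited by its decreasing_by
theorem pvRange3 (t : Int) : PySem.List.pyRange (t - 1) (t + 2) 1 = [t - 1, t, t + 1] := by
  rw [PySem.List.pyRange_one_cons (by omega), PySem.List.pyRange_one_cons (by omega),
    PySem.List.pyRange_one_cons (by omega), PySem.List.pyRange_one_eq_nil (by omega)]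
  norm_num

-- the while-loop of Source B; the head of the task list is the top of the stack, so
-- prepending the neighbour tasks in forward order = Source B's reversed pushes.
def runB : List (List Int) → List PvTask → List (List Int) × Int
  | m, [] => (m, 0)
  | m, .visit 0 _ _ :: ts => runB m ts   -- fuel guard only; never reached from pvFuel
  | m, .visit (n+1) y x :: ts =>
    if 10 ≤ pvGet m y x then
      let ns := (PySem.List.pyRange (y-1) (y+2) 1).flatMap (fun y2 =>
        (PySem.List.pyRange (x-1) (x+2) 1).map (fun x2 => PvTask.bump n y2 x2))
      let r := runB (pvSet m y x 0) (ns ++ ts)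
      (r.1, 1 + r.2)
    else runB m ts
  | m, .bump n y2 x2 :: ts =>
    if pvInb m y2 x2 && (pvGet m y2 x2 != 0) then
      runB (pvSet m y2 x2 (pvGet m y2 x2 + 1)) (.visit n y2 x2 :: ts)
    else runB m ts
termination_by _ ts => (ts.map pvWeight).sum
decreasing_by
  · simp [pvWeight]
  · have h10 : 10 ≤ 10 ^ (n + 1) := by
      calc (10:ℕ) = 10 ^ 1 := by norm_num
      _ ≤ 10 ^ (n + 1) := Nat.pow_le_pow_right (by norm_num) (by omega)
    simp only [pvRange3, List.flatMap_cons, List.flatMap_nil, List.map_cons,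
      List.append_nil, List.cons_append, List.nil_append,
      List.map, List.sum_cons, pvWeight]
    omega
  · simp [pvWeight]
  · simp [pvWeight]
  · simp [pvWeight]

def flash_cell_alt (map : List (List Int)) (y : Int) (x : Int) : Int :=
  (runB map [.visit (pvFuel map) y x]).2

-- ===== PRECONDITION & SPEC =====
-- Pre_ excludes exactly the inputs where Python raises IndexError on map[y][x]
-- (y or x outside the Python index range); both A and B raise there.
def Pre_flash_cell (map : List (List Int)) (y : Int) (x : Int) : Prop :=
  ((PySem.List.pyGet? map y).bind (fun r => PySem.List.pyGet? r x)).isSome = true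
instance (map : List (List Int)) (y : Int) (x : Int) : Decidable (Pre_flash_cell map y x) := by
  unfold Pre_flash_cell; infer_instance

def pvWitness_flash_cell : List (List Int) × Int × Int := ([[10, 1], [2, 3]], 0, 0)

def Spec_flash_cell (map : List (List Int)) (y : Int) (x : Int) (out : Int) : Prop := out = flash_cell_alt map y x
instance (map : List (List Int)) (y : Int) (x : Int) (out : Int) : Decidable (Spec_flash_cell map y x out) := by unfold Spec_flash_cell; infer_instance

-- ===== CLAIM (what is proved, stated in full; the proofs are below) =====
def Claim_equal_flash_cell : Prop := ∀ (map : List (List Int)) (y : Int) (x : Int), Dom_flash_cell map y x → Pre_flash_cell map y x → Spec_flash_cell map y x (flash_cell map y x)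

-- ===== LEMMAS AND PROOFS =====

-- A's inner-loop body as a step function on (map, flash-count) states
def stepA (n : Nat) (st : List (List Int) × Int) (p : Int × Int) : List (List Int) × Int :=
  if pvInb st.1 p.1 p.2 && (pvGet st.1 p.1 p.2 != 0) then
    let r := flashAux n (pvSet st.1 p.1 p.2 (pvGet st.1 p.1 p.2 + 1)) p.1 p.2
    (r.1, st.2 + r.2)
  else st

theorem foldl_nested {α β γ : Type} (ys : List α) (xs : List β) (g : γ → α → β → γ)
    (init : γ) :
    ys.foldl (fun st y => xs.foldl (fun st x => g st y x) st) init
      = (ys.flatMap (fun y => xs.map (fun x => (y, x)))).foldl (fun st p => g st p.1 p.2) init := by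
  induction ys generalizing init with
  | nil => rfl
  | cons y ys ih => simp [List.flatMap_cons, List.foldl_append, List.foldl_map, ih]

theorem stepA_snd (n : Nat) (st : List (List Int) × Int) (p : Int × Int) :
    stepA n st p = ((stepA n (st.1, 0) p).1, st.2 + (stepA n (st.1, 0) p).2) := by
  unfold stepA
  split <;> simp

theorem foldl_stepA_offset (n : Nat) (ps : List (Int × Int)) :
    ∀ (m : List (List Int)) (c : Int),
      ps.foldl (stepA n) (m, c)
        = ((ps.foldl (stepA n) (m, 0)).1, c + (ps.foldl (stepA n) (m, 0)).2) := by
  induction ps with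
  | nil => intro m c; simp
  | cons p ps ih =>
    intro m c
    simp only [List.foldl_cons]
    rw [stepA_snd n (m, c) p]
    rcases hs : stepA n (m, 0) p with ⟨m1, f1⟩
    rw [ih m1 (c + f1), ih m1 f1]
    simp [add_assoc]

theorem runB_bumps (n : Nat)
    (IH : ∀ (m : List (List Int)) (y x : Int) (ts : List PvTask),
      runB m (.visit n y x :: ts)
        = ((runB (flashAux n m y x).1 ts).1,
           (flashAux n m y x).2 + (runB (flashAux n m y x).1 ts).2)) :
    ∀ (ps : List (Int × Int)) (m : List (List Int)) (ts : List PvTask),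
      runB m (ps.map (fun p => PvTask.bump n p.1 p.2) ++ ts)
        = ((runB (ps.foldl (stepA n) (m, 0)).1 ts).1,
           (ps.foldl (stepA n) (m, 0)).2 + (runB (ps.foldl (stepA n) (m, 0)).1 ts).2) := by
  intro ps
  induction ps with
  | nil => intro m ts; simp
  | cons p ps ih =>
    intro m ts
    simp only [List.map_cons, List.cons_append, List.foldl_cons]
    by_cases h : (pvInb m p.1 p.2 && (pvGet m p.1 p.2 != 0)) = true
    · have hstep : stepA n (m, 0) p
          = ((flashAux n (pvSet m p.1 p.2 (pvGet m p.1 p.2 + 1)) p.1 p.2).1,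
             (flashAux n (pvSet m p.1 p.2 (pvGet m p.1 p.2 + 1)) p.1 p.2).2) := by
        simp [stepA, h]
      rw [runB, if_pos h, IH]
      rcases hA : flashAux n (pvSet m p.1 p.2 (pvGet m p.1 p.2 + 1)) p.1 p.2 with ⟨mA, fA⟩
      rw [ih mA ts]
      rw [hstep, hA]
      rw [foldl_stepA_offset n ps mA fA]
      simp [add_assoc]
    · have hstep : stepA n (m, 0) p = (m, 0) := by simp [stepA, h]
      rw [runB, if_neg h, hstep]
      exact ih m ts

theorem runB_visit (n : Nat) :
    ∀ (m : List (List Int)) (y x : Int) (ts : List PvTask),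
      runB m (.visit n y x :: ts)
        = ((runB (flashAux n m y x).1 ts).1,
           (flashAux n m y x).2 + (runB (flashAux n m y x).1 ts).2) := by
  induction n with
  | zero =>
    intro m y x ts
    rw [runB]
    simp [flashAux]
  | succ n IH =>
    intro m y x ts
    rw [runB]
    by_cases h : 10 ≤ pvGet m y x
    · rw [if_pos h]
      simp only [flashAux, if_pos h]
      have hns : (PySem.List.pyRange (y-1) (y+2) 1).flatMap (fun y2 =>
            (PySem.List.pyRange (x-1) (x+2) 1).map (fun x2 => PvTask.bump n y2 x2))
          = ((PySem.List.pyRange (y-1) (y+2) 1).flatMap (fun y2 =>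
              (PySem.List.pyRange (x-1) (x+2) 1).map (fun x2 => (y2, x2)))).map
              (fun p => PvTask.bump n p.1 p.2) := by
        simp [List.map_flatMap, List.map_map, Function.comp_def]
      rw [hns, runB_bumps n IH]
      rw [foldl_nested (PySem.List.pyRange (y-1) (y+2) 1) (PySem.List.pyRange (x-1) (x+2) 1)
        (fun st y2 x2 => if pvInb st.1 y2 x2 && (pvGet st.1 y2 x2 != 0) then
          let r := flashAux n (pvSet st.1 y2 x2 (pvGet st.1 y2 x2 + 1)) y2 x2
          (r.1, st.2 + r.2) else st) (pvSet m y x 0, 0)]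
      have hfun : (fun (st : List (List Int) × Int) (p : Int × Int) =>
          (fun st y2 x2 => if pvInb st.1 y2 x2 && (pvGet st.1 y2 x2 != 0) then
            let r := flashAux n (pvSet st.1 y2 x2 (pvGet st.1 y2 x2 + 1)) y2 x2
            (r.1, st.2 + r.2) else st) st p.1 p.2) = stepA n := by
        funext st p; rfl
      rw [hfun]
      simp [add_assoc]
    · rw [if_neg h]
      simp [flashAux, h]

-- ===== VERDICT (by name: the statement is the Claim_ definition above) =====
theorem flash_cell_spec : Claim_equal_flash_cell := by
  intro map y x _ _
  unfold Spec_flash_cell flash_cell flash_cell_alt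
  rw [runB_visit]
  rw [runB]
  simp
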